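-- pv_equiv track=rewrite | github.com/swallahfx/Cryptography | dict_comp.py | dict_comp
-- ===== SOURCE A (Python) =====
-- def dict_comp(stop, step):
--   #formula definition
--   stop_step_div = stop//step
--   stop = stop_step_div*step
--
--   stop =range(1,stop+1)
--   stop_step_div = range(1,stop_step_div +1)
--
--   #forming dict keys
--   key_former = [f"item - {i}" for i in (stop_step_div)]
--
--   #forming dict values
--   val_origin = [i for i in stop]
--   value_former = [val_origin[i:i+step] for i in range(0,len(val_origin),step)]
--
--   #dict formed
--   dict_formed = {key:value for key,value in zip(key_former,value_former)}
--
--   return dict_formed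
-- ===== SOURCE B (Python) =====
-- def dict_comp(stop, step):
--   # Single pass: walk the chunk ends step, 2*step, ... while they stay inside
--   # the covered range (0, limit]; each chunk is derived arithmetically from its
--   # end, so the full 1..stop list is never materialized, sliced or zipped.
--   limit = (stop // step) * step
--   out = {}
--   end = step
--   i = 1
--   while 0 < end <= limit:
--     out[f"item - {i}"] = list(range(end - step + 1, end + 1))
--     end += step
--     i += 1
--   return out
-- ===== Notes on version B (the rewrite author's own statement) =====
-- stated objective: alternative
-- what changed: B is a single while-loop over chunk ends step, 2*step, ... within (0, (stop//step)*step], deriving each key and chunk arithmetically from the running end, instead of materializing the full list 1..stop, slicing it into chunks, building a parallel key list and zipping the two.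
import Mathlib
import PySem

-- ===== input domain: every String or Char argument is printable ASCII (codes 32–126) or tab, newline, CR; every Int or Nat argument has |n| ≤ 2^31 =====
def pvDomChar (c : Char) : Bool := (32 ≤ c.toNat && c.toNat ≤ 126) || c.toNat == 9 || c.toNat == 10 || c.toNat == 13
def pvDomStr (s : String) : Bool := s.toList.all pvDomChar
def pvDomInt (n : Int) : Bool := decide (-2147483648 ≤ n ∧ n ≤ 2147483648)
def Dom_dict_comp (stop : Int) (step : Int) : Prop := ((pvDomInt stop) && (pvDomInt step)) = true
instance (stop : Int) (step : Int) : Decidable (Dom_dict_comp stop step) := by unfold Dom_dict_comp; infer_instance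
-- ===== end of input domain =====

-- B replaces A's materialize-1..stop / slice / zip pipeline by a single while-loop over chunk
-- ends that derives each key and chunk arithmetically (objective: alternative, same cost).

-- ===== PORT A =====
def dict_comp (stop : Int) (step : Int) : List (String × List Int) :=
  let stop_step_div := PySem.Int.floordiv stop step
  let stop1 := stop_step_div * step
  let stopR := PySem.List.pyRange 1 (stop1 + 1) 1
  let div_R := PySem.List.pyRange 1 (stop_step_div + 1) 1
  let key_former := div_R.map (fun i => "item - " ++ PySem.Int.toStr i)
  let val_origin := stopR.map (fun i => i)
  let value_former := (PySem.List.pyRange 0 (val_origin.length : Int) step).map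
    (fun i => PySem.List.slice val_origin (some i) (some (i + step)))
  let dict_formed := (key_former.zip value_former).foldl
    (fun d kv => d.insert kv.1 kv.2) (PySem.Dict.empty : PySem.Dict String (List Int))
  dict_formed.items

-- ===== PORT B =====
-- the while loop of Source B, made structurally total with a fuel bound that provably
-- dominates the number of iterations (the loop body and exit test are unchanged)
def pvLoopB (limit step : Int) : Nat → Int → Int → PySem.Dict String (List Int) →
    PySem.Dict String (List Int)
  | 0, _, _, d => d
  | fuel + 1, e, i, d =>
    if 0 < e ∧ e ≤ limit then
      pvLoopB limit step fuel (e + step) (i + 1)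
        (d.insert ("item - " ++ PySem.Int.toStr i)
          (PySem.List.pyRange (e - step + 1) (e + 1) 1))
    else d

def dict_comp_alt (stop : Int) (step : Int) : List (String × List Int) :=
  let limit := PySem.Int.floordiv stop step * step
  (pvLoopB limit step limit.toNat step 1 (PySem.Dict.empty : PySem.Dict String (List Int))).items

-- ===== PRECONDITION & SPEC =====
-- Python raises ZeroDivisionError on stop//step when step == 0; nothing else raises.
def Pre_dict_comp (stop : Int) (step : Int) : Prop := step ≠ 0
instance (stop : Int) (step : Int) : Decidable (Pre_dict_comp stop step) := by
  unfold Pre_dict_comp; infer_instance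
def pvWitness_dict_comp : Int × Int := (6, 2)

def Spec_dict_comp (stop : Int) (step : Int) (out : List (String × List Int)) : Prop :=
  out = dict_comp_alt stop step
instance (stop : Int) (step : Int) (out : List (String × List Int)) :
    Decidable (Spec_dict_comp stop step out) := by unfold Spec_dict_comp; infer_instance

-- ===== CLAIM (what is proved, stated in full; the proofs are below) =====
def Claim_equal_dict_comp : Prop := ∀ (stop : Int) (step : Int), Dom_dict_comp stop step →
  Pre_dict_comp stop step → Spec_dict_comp stop step (dict_comp stop step)

-- ===== LEMMAS AND PROOFS =====

-- dropping j elements of a unit-step range advances its start by j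
theorem pv_drop_pyRange (j : Nat) (a b : Int) :
    (PySem.List.pyRange a b 1).drop j = PySem.List.pyRange (a + j) b 1 := by
  induction j generalizing a with
  | zero => simp
  | succ j ih =>
    by_cases h : a < b
    · rw [PySem.List.pyRange_one_cons h, List.drop_succ_cons, ih]
      congr 1 <;> push_cast <;> ring
    · rw [PySem.List.pyRange_one_eq_nil (by omega), PySem.List.pyRange_one_eq_nil (by omega)]
      simp

-- taking s elements of a unit-step range that has at least s elements truncates its end
theorem pv_take_pyRange (s : Nat) (a b : Int) (h : a + s ≤ b) :
    (PySem.List.pyRange a b 1).take s = PySem.List.pyRange a (a + s) 1 := by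
  induction s generalizing a with
  | zero =>
    simp only [Nat.cast_zero, add_zero, List.take_zero]
    exact (PySem.List.pyRange_one_eq_nil (le_refl a)).symm
  | succ s ih =>
    have hab : a < b := by push_cast at h; omega
    have hbnd : a + ((s + 1 : Nat) : Int) = (a + 1) + ((s : Nat) : Int) := by push_cast; ring
    rw [PySem.List.pyRange_one_cons hab, List.take_succ_cons,
        ih (a + 1) (by push_cast at h ⊢; omega), hbnd,
        PySem.List.pyRange_one_cons (a := a) (b := (a + 1) + ((s : Nat) : Int))
          (by push_cast; omega)]

-- an in-bounds slice of a unit-step range is a unit-step range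
theorem pv_slice_pyRange (a b j s : Int) (hj : 0 ≤ j) (hs : 0 < s) (hb : a + j + s ≤ b) :
    PySem.List.slice (PySem.List.pyRange a b 1) (some j) (some (j + s)) =
      PySem.List.pyRange (a + j) (a + j + s) 1 := by
  obtain ⟨jn, rfl⟩ : ∃ jn : Nat, j = (jn : Int) := ⟨j.toNat, (Int.toNat_of_nonneg hj).symm⟩
  obtain ⟨sn, rfl⟩ : ∃ sn : Nat, s = (sn : Int) := ⟨s.toNat, (Int.toNat_of_nonneg hs.le).symm⟩
  rw [PySem.List.slice_natCast_add, pv_drop_pyRange, pv_take_pyRange sn (a + jn) b (by omega)]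

-- B's loop never runs when the first chunk end is nonpositive
theorem pv_loop_nonpos (limit step : Int) (fuel : Nat) (e i : Int)
    (d : PySem.Dict String (List Int)) (he : e ≤ 0) :
    pvLoopB limit step fuel e i d = d := by
  cases fuel with
  | zero => rfl
  | succ fuel =>
    simp only [pvLoopB]
    rw [if_neg]
    rintro ⟨h1, _⟩
    omega

-- with a positive step, B's loop from chunk end j*step is the canonical fold over j-1, …, n-1
theorem pv_loop_eq (n step : Int) (hs : 0 < step) :
    ∀ (fuel : Nat) (j : Int) (d : PySem.Dict String (List Int)), 1 ≤ j →
      (n - j + 1).toNat ≤ fuel →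
      pvLoopB (n * step) step fuel (j * step) j d =
        (PySem.List.pyRange (j - 1) n 1).foldl
          (fun d k => d.insert ("item - " ++ PySem.Int.toStr (k + 1))
            (PySem.List.pyRange (k * step + 1) ((k + 1) * step + 1) 1)) d := by
  intro fuel
  induction fuel with
  | zero =>
    intro j d hj hf
    rw [PySem.List.pyRange_one_eq_nil (by omega)]
    rfl
  | succ fuel ih =>
    intro j d hj hf
    by_cases hcond : j ≤ n
    · have hc : 0 < j * step ∧ j * step ≤ n * step :=
        ⟨mul_pos (by omega) hs, mul_le_mul_of_nonneg_right (by omega) hs.le⟩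
      simp only [pvLoopB]
      rw [if_pos hc]
      have he : j * step + step = (j + 1) * step := by ring
      rw [he, ih (j + 1) _ (by omega) (by omega),
          PySem.List.pyRange_one_cons (a := j - 1) (b := n) (by omega), List.foldl_cons]
      have h1 : (j : Int) - 1 + 1 = j := by ring
      have h2 : ((j : Int) - 1) * step + 1 = j * step - step + 1 := by ring
      have h4 : (j : Int) + 1 - 1 = j := by ring
      rw [h1, h2, h4]
    · have hc : ¬(0 < j * step ∧ j * step ≤ n * step) := by
        rintro ⟨_, h2⟩
        exact hcond (le_of_mul_le_mul_right h2 hs)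
      simp only [pvLoopB]
      rw [if_neg hc, PySem.List.pyRange_one_eq_nil (by omega)]
      rfl

-- negative step: A returns the empty list (the chunking range never runs)
theorem pv_A_nil_neg (stop step : Int) (hs : step < 0) : dict_comp stop step = [] := by
  by_cases hn : PySem.Int.floordiv stop step ≤ 0
  · simp only [dict_comp]
    rw [PySem.List.pyRange_one_eq_nil (a := 1)
      (b := PySem.Int.floordiv stop step + 1) (by omega)]
    rfl
  · push_neg at hn
    simp only [dict_comp]
    have hso : PySem.Int.floordiv stop step * step + 1 ≤ 1 := by nlinarith
    rw [PySem.List.pyRange_one_eq_nil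
      (b := PySem.Int.floordiv stop step * step + 1) (by omega)]
    simp only [List.map_nil, List.length_nil, Nat.cast_zero]
    have hr0 : PySem.List.pyRange 0 0 step = [] := by
      apply List.eq_nil_iff_forall_not_mem.mpr
      intro x hx
      have := (PySem.List.mem_pyRange_iff_of_neg hs x).mp hx
      omega
    rw [hr0]
    simp only [List.map_nil, List.zip_nil_right, List.foldl_nil]
    rfl

-- nonpositive step: B returns the empty list (its loop never runs)
theorem pv_B_nil_nonpos (stop step : Int) (hs : step ≤ 0) : dict_comp_alt stop step = [] := by
  simp only [dict_comp_alt]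
  rw [pv_loop_nonpos _ _ _ _ _ _ hs]
  rfl

-- the main case: positive step, the two ports agree
theorem pv_main (stop step : Int) (hs : 0 < step) :
    dict_comp stop step = dict_comp_alt stop step := by
  set n : Int := PySem.Int.floordiv stop step with hn
  -- B's side: the loop is the canonical fold over 0, …, n-1
  have hBside : dict_comp_alt stop step =
      ((PySem.List.pyRange 0 n 1).foldl
        (fun d k => d.insert ("item - " ++ PySem.Int.toStr (k + 1))
          (PySem.List.pyRange (k * step + 1) ((k + 1) * step + 1) 1))
        (PySem.Dict.empty : PySem.Dict String (List Int))).items := by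
    simp only [dict_comp_alt, ← hn]
    have hfuel : (n - 1 + 1).toNat ≤ (n * step).toNat := by
      by_cases h : n ≤ 0
      · have h2 : (n - 1 + 1).toNat = 0 := by omega
        omega
      · have h2 : n ≤ n * step := le_mul_of_one_le_right (by omega) hs
        omega
    have h := pv_loop_eq n step hs (n * step).toNat 1 PySem.Dict.empty (le_refl 1) hfuel
    rw [one_mul] at h
    rw [h]
    norm_num
  rw [hBside]
  by_cases hn0 : n ≤ 0
  · rw [PySem.List.pyRange_one_eq_nil (a := 0) (b := n) (by omega), List.foldl_nil]
    simp only [dict_comp, ← hn]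
    rw [PySem.List.pyRange_one_eq_nil (a := 1) (b := n + 1) (by omega)]
    rfl
  · push_neg at hn0
    have hns : 0 < n * step := mul_pos hn0 hs
    simp only [dict_comp, ← hn, List.map_id']
    rw [PySem.List.length_pyRange_one]
    have hlen : (((n * step + 1 - 1).toNat : Nat) : Int) = n * step := by omega
    rw [hlen]
    rw [PySem.List.pyRange_of_pos 0 (n * step) hs, if_pos hns]
    have hcnt : ((n * step - 0 + step - 1) / step).toNat = n.toNat := by
      have h1 : n * step - 0 + step - 1 = (step - 1) + n * step := by ring
      rw [h1, Int.add_mul_ediv_right _ _ (by omega : step ≠ 0),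
          Int.ediv_eq_zero_of_lt (by omega) (by omega)]
      omega
    rw [hcnt, PySem.List.pyRange_one 1 (n + 1), PySem.List.pyRange_zero n]
    have hcnt2 : (n + 1 - 1).toNat = n.toNat := by omega
    rw [hcnt2, List.map_map, List.map_map, List.zip_map', List.foldl_map, List.foldl_map]
    apply congrArg
    apply PySem.List.foldl_congr_mem
    intro acc k hk
    have hkn : (k : Int) < n := by
      rw [List.mem_range] at hk; omega
    simp only [Function.comp]
    have hkey : (1 : Int) + k = (k : Int) + 1 := by ring
    rw [hkey]
    congr 1
    have hv := pv_slice_pyRange 1 (n * step + 1) (0 + step * k) step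
      (by positivity) hs (by nlinarith)
    rw [hv]
    congr 1 <;> ring

-- ===== VERDICT (by name: the statement is the Claim_ definition above) =====
theorem dict_comp_spec : Claim_equal_dict_comp := by
  intro stop step _hdom hpre
  show dict_comp stop step = dict_comp_alt stop step
  rcases lt_trichotomy step 0 with hs | hs | hs
  · rw [pv_A_nil_neg stop step hs, pv_B_nil_nonpos stop step hs.le]
  · exact absurd hs hpre
  · exact pv_main stop step hs
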